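-- pv_equiv track=rewrite | github.com/lammesen/glowing-engine | sim_devices/cli_server.py | merge_commands
-- ===== SOURCE A (Python) =====
-- from typing import Dict, List
--
-- def merge_commands(base: dict, overrides: dict) -> Dict[str, List[str]]:
--     merged: Dict[str, List[str]] = {}
--     for source in (base or {}, overrides or {}):
--         for command, output in (source or {}).items():
--             if isinstance(output, str):
--                 merged[command] = [output]
--             else:
--                 merged[command] = [str(line) for line in output]
--     return merged
-- ===== SOURCE B (Python) =====
-- def merge_commands(base: dict, overrides: dict):
--     # Back-to-front, no overwriting: keys in first-occurrence order, values by a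
--     # single reversed first-wins (setdefault) pass over all items, normalized last.
--     items = list((base or {}).items()) + list((overrides or {}).items())
--     keys = list(dict.fromkeys(k for k, _ in items))
--     last = {}
--     for k, v in reversed(items):
--         last.setdefault(k, v)
--
--     def norm(v):
--         return [v] if isinstance(v, str) else [str(x) for x in v]
--
--     return {k: norm(last[k]) for k in keys}
-- ===== Notes on version B (the rewrite author's own statement) =====
-- stated objective: alternative
-- what changed: A builds the result in one forward dict-overwrite merge loop that normalizes as it goes; B never overwrites: it dedups the keys in first-occurrence order, fixes each key's final raw value with a single reversed first-wins (setdefault) pass over all items, and normalizes in a last pass.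
import Mathlib
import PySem

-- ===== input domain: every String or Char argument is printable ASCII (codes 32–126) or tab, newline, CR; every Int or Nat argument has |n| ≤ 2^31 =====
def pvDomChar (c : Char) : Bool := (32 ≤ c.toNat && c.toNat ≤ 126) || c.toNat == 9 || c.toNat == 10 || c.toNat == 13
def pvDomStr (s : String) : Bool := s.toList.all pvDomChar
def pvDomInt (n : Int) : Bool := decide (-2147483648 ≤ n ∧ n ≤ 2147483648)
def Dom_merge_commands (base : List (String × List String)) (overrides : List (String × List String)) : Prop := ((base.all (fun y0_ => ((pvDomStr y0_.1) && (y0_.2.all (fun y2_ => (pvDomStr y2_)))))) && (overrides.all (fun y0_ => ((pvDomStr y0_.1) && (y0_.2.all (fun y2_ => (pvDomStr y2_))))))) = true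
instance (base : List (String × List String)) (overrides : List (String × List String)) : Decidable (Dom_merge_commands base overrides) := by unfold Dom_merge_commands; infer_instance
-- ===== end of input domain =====

-- B replaces A's forward dict-overwrite merge loop with a back-to-front algorithm:
-- keys deduped in first-occurrence order, values fixed by one reversed first-wins
-- (setdefault) pass over all items, normalized in a final pass. (alternative)
-- Under the type convention values are List String, so Python's `isinstance(output, str)`
-- branch never fires and `str(line)` on a str is the identity; both ports reflect that.

-- ===== PORT A =====
def merge_commands (base : List (String × List String)) (overrides : List (String × List String)) : List (String × List String) :=
  -- merged = {}; for source in (base or {}, overrides or {}): for command, output in source.items():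
  --   merged[command] = [str(line) for line in output]   (`base or {}` is the identity on assoc lists)
  (([base, overrides]).foldl (fun merged source =>
      source.foldl (fun merged kv =>
        merged.insert kv.1 (kv.2.map (fun line => line))) merged)
    PySem.Dict.empty).items

-- ===== PORT B =====
def merge_commands_alt (base : List (String × List String)) (overrides : List (String × List String)) : List (String × List String) :=
  -- items = base items + overrides items; keys = list(dict.fromkeys(k for k,_ in items))
  let items := base ++ overrides
  let keys := PySem.List.dedup (items.map (fun kv => kv.1))
  -- last = {}; for k, v in reversed(items): last.setdefault(k, v)
  let last := items.reverse.foldl (fun d (kv : String × List String) => d.setdefault kv.1 kv.2) PySem.Dict.empty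
  -- {k: norm(last[k]) for k in keys}   (k ∈ keys, so last[k] never raises; none-arm for totality)
  keys.map (fun k =>
    (k, (match last.get? k with
         | some v => v
         | none => []).map (fun line => line)))

-- ===== PRECONDITION & SPEC =====
def Spec_merge_commands (base : List (String × List String)) (overrides : List (String × List String)) (out : List (String × List String)) : Prop := out = merge_commands_alt base overrides
instance (base : List (String × List String)) (overrides : List (String × List String)) (out : List (String × List String)) : Decidable (Spec_merge_commands base overrides out) := by unfold Spec_merge_commands; infer_instance

-- ===== CLAIM (what is proved, stated in full; the proofs are below) =====
def Claim_equal_merge_commands : Prop := ∀ (base : List (String × List String)) (overrides : List (String × List String)), Dom_merge_commands base overrides → Spec_merge_commands base overrides (merge_commands base overrides)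

-- ===== LEMMAS AND PROOFS =====

-- A's insert-loop lookup is the LAST matching value in the list (or the start dict's).
theorem getD_foldl_insert_find (l : List (String × List String))
    (d : PySem.Dict String (List String)) (k : String) :
    (l.foldl (fun m kv => m.insert kv.1 (kv.2.map (fun line => line))) d).getD k []
      = match l.reverse.find? (fun kv => kv.1 == k) with
        | some kv => kv.2.map (fun line => line)
        | none => d.getD k [] := by
  induction l generalizing d with
  | nil => simp
  | cons kv0 t ih =>
    simp only [List.foldl_cons, List.reverse_cons, List.find?_append]
    rw [ih]
    cases h : t.reverse.find? (fun kv => kv.1 == k) with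
    | some kv => simp
    | none =>
      simp only [List.find?_cons, List.find?_nil]
      by_cases hk : kv0.1 = k
      · subst hk
        simp
      · have hb : (kv0.1 == k) = false := by simpa using hk
        simp [hb, PySem.Dict.getD_insert, Ne.symm hk]

-- B's setdefault-loop lookup is the FIRST matching value in the list (or the start dict's).
theorem get?_foldl_setdefault (l : List (String × List String))
    (d : PySem.Dict String (List String)) (k : String) :
    (l.foldl (fun d kv => d.setdefault kv.1 kv.2) d).get? k
      = match d.get? k with
        | some v => some v
        | none => (l.find? (fun kv => kv.1 == k)).map (fun kv => kv.2) := by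
  induction l generalizing d with
  | nil => cases h : d.get? k <;> simp [h]
  | cons kv0 t ih =>
    simp only [List.foldl_cons, List.find?_cons]
    rw [ih]
    by_cases hc : d.contains kv0.1
    · rw [PySem.Dict.setdefault_of_contains (h := hc)]
      cases h : d.get? k with
      | some v => simp
      | none =>
        have hb : (kv0.1 == k) = false := by
          by_contra hne
          have hkk : kv0.1 = k := by simpa using hne
          rw [PySem.Dict.contains_eq_isSome_get?, hkk, h] at hc
          simp at hc
        simp [hb]
    · rw [PySem.Dict.setdefault_of_not_contains (h := by simpa using hc)]
      by_cases hk : kv0.1 = k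
      · subst hk
        have h0 : d.get? kv0.1 = none := by
          rw [PySem.Dict.get?_eq_none_iff_contains]; simpa using hc
        simp [h0]
      · have hb : (kv0.1 == k) = false := by simpa using hk
        simp [hb, PySem.Dict.get?_insert, Ne.symm hk]

-- ===== VERDICT (by name: the statement is the Claim_ definition above) =====
theorem merge_commands_spec : Claim_equal_merge_commands := by
  intro base overrides _
  unfold Spec_merge_commands merge_commands merge_commands_alt
  simp only [List.foldl_cons, List.foldl_nil, ← List.foldl_append]
  set l := base ++ overrides with hl
  have hnd : ((l.foldl (fun m kv => m.insert kv.1 (kv.2.map (fun line => line))) PySem.Dict.empty)).keys.Nodup :=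
    PySem.Dict.nodup_keys_foldl_insert_key l (fun kv => kv.1) _ _ PySem.Dict.nodup_keys_empty
  rw [PySem.Dict.items_eq_map_keys _ hnd []]
  rw [PySem.Dict.keys_foldl_insert_key]
  simp only [PySem.Dict.keys_empty, PySem.Set.update_nil_left, ← PySem.List.dedup_eq_ofList]
  refine List.map_congr_left ?_
  intro k hk
  rw [getD_foldl_insert_find, get?_foldl_setdefault]
  simp only [PySem.Dict.get?_empty]
  cases h : l.reverse.find? (fun kv => kv.1 == k) with
  | some kv => simp
  | none =>
    -- impossible: k came from dedup of the keys, so some item matches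
    exfalso
    rw [PySem.List.mem_dedup] at hk
    obtain ⟨kv, hkv, hfst⟩ := List.mem_map.mp hk
    have := List.find?_eq_none.mp h kv (by simpa using hkv)
    simp [hfst] at this
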